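-- pv_equiv track=rewrite | github.com/mims-harvard/SPECTRA | SPECTRA_SD/PDBBind/equibind_similarity_util.py | capital_within_bracket
-- ===== SOURCE A (Python) =====
-- def capital_within_bracket(mol):
--     #Some heuristics to try to get molecule in correct format for RDKit
--     rebuild_mol = ''
--     cap = False
--
--     for i in mol:
--         if i == '[' or i == '(':
--             cap = True
--         elif i == ']' or i == ')':
--             cap = False
--
--         if cap or i == 'p':
--             rebuild_mol = rebuild_mol + i.upper()
--         else:
--             rebuild_mol = rebuild_mol + i
--     return rebuild_mol
-- ===== SOURCE B (Python) =====
-- def capital_within_bracket(mol):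
--     # Region-based rewrite: scan for bracket regions and upper-case whole slices,
--     # instead of a per-character cap flag.
--     out = []
--     i = 0
--     n = len(mol)
--     while i < n:
--         j = i
--         while j < n and mol[j] not in '[(':
--             j += 1
--         out.append(''.join('P' if c == 'p' else c for c in mol[i:j]))
--         if j == n:
--             break
--         k = j
--         while k < n and mol[k] not in '])':
--             k += 1
--         out.append(mol[j:k].upper())
--         i = k
--     return ''.join(out)
-- ===== Notes on version B (the rewrite author's own statement) =====
-- stated objective: alternative
-- what changed: Replaced the per-character cap-flag state machine with region scanning: B finds each bracket region (opener up to the next closer) and upper-cases whole slices, mapping p->P only in the outside chunks, joining the pieces at the end.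
import Mathlib
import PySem

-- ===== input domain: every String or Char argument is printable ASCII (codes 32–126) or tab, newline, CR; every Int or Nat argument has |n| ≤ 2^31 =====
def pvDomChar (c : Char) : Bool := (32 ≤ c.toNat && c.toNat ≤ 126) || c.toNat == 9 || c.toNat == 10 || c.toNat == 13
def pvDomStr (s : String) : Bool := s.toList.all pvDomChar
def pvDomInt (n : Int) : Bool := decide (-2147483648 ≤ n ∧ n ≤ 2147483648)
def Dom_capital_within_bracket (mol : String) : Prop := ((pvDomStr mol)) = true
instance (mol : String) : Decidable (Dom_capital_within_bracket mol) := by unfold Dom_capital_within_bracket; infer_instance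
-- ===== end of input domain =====

-- B replaces A's per-character cap-flag state machine by slice-at-a-time region scanning
-- (objective: alternative structure); return values proved equal on all inputs.

-- ===== PORT A =====
-- step of A's for-loop: update cap, then append i.upper() or i
-- (i.upper() on one char ported as PySem.Chars.upperChar; exact on the ASCII domain)
def pvStepA (st : Bool × List Char) (c : Char) : Bool × List Char :=
  let cap := if c = '[' ∨ c = '(' then true
             else if c = ']' ∨ c = ')' then false
             else st.1
  (cap, st.2 ++ [if cap || c = 'p' then PySem.Chars.upperChar c else c])

def capital_within_bracket (mol : String) : String :=
  String.ofList ((mol.toList.foldl pvStepA (false, [])).2)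

-- ===== PORT B =====
def pvIsOpen (c : Char) : Bool := c = '[' ∨ c = '('
def pvIsClose (c : Char) : Bool := c = ']' ∨ c = ')'

-- B's inner `while ... not stop: advance` scans: (prefix before first stop-char, rest)
def pvScanTo (stop : Char → Bool) : List Char → List Char × List Char
  | [] => ([], [])
  | c :: cs =>
      if stop c then ([], c :: cs)
      else
        let p := pvScanTo stop cs
        (c :: p.1, p.2)

theorem pvScanTo_snd_len (stop : Char → Bool) (l : List Char) :
    (pvScanTo stop l).2.length ≤ l.length := by
  induction l with
  | nil => simp [pvScanTo]
  | cons c cs ih =>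
      simp only [pvScanTo]
      split
      · simp
      · simpa using Nat.le_succ_of_le ih

-- the 'P' substitution B applies to the outside chunks
def pvMapP (l : List Char) : List Char := l.map (fun c => if c = 'p' then 'P' else c)

def pvAltGo (l : List Char) : List Char :=
  match hmatch : (pvScanTo pvIsOpen l).2 with
  | [] => pvMapP (pvScanTo pvIsOpen l).1
  | r :: rs =>
      pvMapP (pvScanTo pvIsOpen l).1 ++ PySem.Chars.upper (r :: (pvScanTo pvIsClose rs).1)
        ++ pvAltGo (pvScanTo pvIsClose rs).2
termination_by l.length
decreasing_by
  have h1 := pvScanTo_snd_len pvIsOpen l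
  rw [hmatch] at h1
  simp only [List.length_cons] at h1
  have h2 := pvScanTo_snd_len pvIsClose rs
  omega

def capital_within_bracket_alt (mol : String) : String :=
  String.ofList (pvAltGo mol.toList)

-- ===== PRECONDITION & SPEC =====
def Spec_capital_within_bracket (mol : String) (out : String) : Prop := out = capital_within_bracket_alt mol
instance (mol : String) (out : String) : Decidable (Spec_capital_within_bracket mol out) := by unfold Spec_capital_within_bracket; infer_instance

-- ===== CLAIM (what is proved, stated in full; the proofs are below) =====
def Claim_equal_capital_within_bracket : Prop := ∀ (mol : String), Dom_capital_within_bracket mol → Spec_capital_within_bracket mol (capital_within_bracket mol)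

-- ===== LEMMAS AND PROOFS =====

-- per-character output of A, state-passing form
def pvGoA (cap : Bool) : List Char → List Char
  | [] => []
  | c :: cs =>
      let cap' := if c = '[' ∨ c = '(' then true
                  else if c = ']' ∨ c = ')' then false
                  else cap
      (if cap' || c = 'p' then PySem.Chars.upperChar c else c) :: pvGoA cap' cs

theorem pvFoldA_eq_goA (l : List Char) (cap : Bool) (acc : List Char) :
    (l.foldl pvStepA (cap, acc)).2 = acc ++ pvGoA cap l := by
  induction l generalizing cap acc with
  | nil => simp [pvGoA]
  | cons c cs ih =>
      simp only [List.foldl_cons, pvStepA, pvGoA, ih]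
      simp

theorem pvScanTo_decomp (stop : Char → Bool) (l : List Char) :
    l = (pvScanTo stop l).1 ++ (pvScanTo stop l).2 ∧
    (∀ c ∈ (pvScanTo stop l).1, stop c = false) ∧
    (∀ c ∈ (pvScanTo stop l).2.head?, stop c = true) := by
  induction l with
  | nil => simp [pvScanTo]
  | cons c cs ih =>
      simp only [pvScanTo]
      split
      · rename_i h
        refine ⟨by simp, by simp, ?_⟩
        intro x hx; simp at hx; subst hx; exact h
      · rename_i h
        refine ⟨?_, ?_, ih.2.2⟩
        · simpa using congrArg (c :: ·) ih.1
        · intro x hx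
          simp at hx
          rcases hx with hx | hx
          · subst hx; exact Bool.eq_false_iff.mpr h
          · exact ih.2.1 x hx
  
theorem pvGoA_false_noOpen (pre rest : List Char) (h : ∀ c ∈ pre, pvIsOpen c = false) :
    pvGoA false (pre ++ rest) = pvMapP pre ++ pvGoA false rest := by
  induction pre with
  | nil => simp [pvMapP]
  | cons c cs ih =>
      have hc : pvIsOpen c = false := h c (by simp)
      have hcs : ∀ x ∈ cs, pvIsOpen x = false := fun x hx => h x (by simp [hx])
      have hno : ¬ (c = '[' ∨ c = '(') := by
        simpa [pvIsOpen] using hc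
      simp only [List.cons_append, pvGoA, pvMapP, List.map_cons, if_neg hno]
      by_cases hcl : c = ']' ∨ c = ')'
      · have hp : ¬ c = 'p' := by rcases hcl with h | h <;> simp [h]
        simp [hcl, hp, ih hcs, pvMapP]
      · by_cases hp : c = 'p'
        · subst hp
          simp [ih hcs, pvMapP, PySem.Chars.upperChar, PySem.Chars.islower]
        · simp [hcl, hp, ih hcs, pvMapP]

theorem pvGoA_true_noClose (reg rest : List Char) (h : ∀ c ∈ reg, pvIsClose c = false) :
    pvGoA true (reg ++ rest) = PySem.Chars.upper reg ++ pvGoA true rest := by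
  induction reg with
  | nil => simp [PySem.Chars.upper]
  | cons c cs ih =>
      have hc : pvIsClose c = false := h c (by simp)
      have hcs : ∀ x ∈ cs, pvIsClose x = false := fun x hx => h x (by simp [hx])
      have hno : ¬ (c = ']' ∨ c = ')') := by
        simpa [pvIsClose] using hc
      simp only [List.cons_append, pvGoA, PySem.Chars.upper, List.map_cons]
      by_cases hop : c = '[' ∨ c = '('
      · simp [hop, ih hcs, PySem.Chars.upper]
      · simp [hop, hno, ih hcs, PySem.Chars.upper]

theorem pvAltGo_eq (l : List Char) :
    pvAltGo l = (match (pvScanTo pvIsOpen l).2 with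
      | [] => pvMapP (pvScanTo pvIsOpen l).1
      | r :: rs =>
          pvMapP (pvScanTo pvIsOpen l).1 ++ PySem.Chars.upper (r :: (pvScanTo pvIsClose rs).1)
            ++ pvAltGo (pvScanTo pvIsClose rs).2) := by
  rw [pvAltGo]
  split <;> rename_i heq <;> rw [heq]

theorem pvAltGo_cons_notOpen (c : Char) (cs : List Char) (h : pvIsOpen c = false) :
    pvAltGo (c :: cs) = (if c = 'p' then 'P' else c) :: pvAltGo cs := by
  rw [pvAltGo_eq (c :: cs), pvAltGo_eq cs]
  simp only [pvScanTo, h, Bool.false_eq_true, if_false]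
  cases hr : (pvScanTo pvIsOpen cs).2 <;> simp [pvMapP]

theorem pvGoA_false_eq_altGo (n : Nat) (l : List Char) (hn : l.length ≤ n) :
    pvGoA false l = pvAltGo l := by
  induction n generalizing l with
  | zero =>
      have : l = [] := List.length_eq_zero_iff.mp (Nat.le_zero.mp hn)
      subst this; simp [pvGoA, pvAltGo, pvScanTo, pvMapP]
  | succ n ih =>
      obtain ⟨hl, hpre, hhead⟩ := pvScanTo_decomp pvIsOpen l
      rw [pvAltGo_eq]
      cases hr : (pvScanTo pvIsOpen l).2 with
      | nil =>
          rw [hr] at hl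
          conv_lhs => rw [hl]
          rw [List.append_nil] at hl ⊢
          have := pvGoA_false_noOpen (pvScanTo pvIsOpen l).1 [] hpre
          simp only [List.append_nil] at this
          rw [this]
          simp [pvGoA]
      | cons r rs =>
          have hropen : pvIsOpen r = true := by
            have := hhead r; rw [hr] at this; exact this (by simp)
          rw [hr] at hl
          have hrop : r = '[' ∨ r = '(' := by
            simpa [pvIsOpen] using hropen
          obtain ⟨hrs, hreg, hhead2⟩ := pvScanTo_decomp pvIsClose rs
          conv_lhs => rw [hl]
          rw [pvGoA_false_noOpen _ (r :: rs) hpre]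
          have hstep : pvGoA false (r :: rs) = PySem.Chars.upperChar r :: pvGoA true rs := by
            rcases hrop with h | h <;> simp [pvGoA, h]
          rw [hstep]
          conv_lhs => rw [hrs]
          rw [pvGoA_true_noClose _ _ hreg]
          -- length bound for IH on the tail after the closer
          have hlen : (pvScanTo pvIsClose rs).2.length ≤ rs.length :=
            pvScanTo_snd_len _ _
          have hlrest : (pvScanTo pvIsOpen l).1.length + 1 + rs.length ≤ n + 1 := by
            have hr2 : l.length = ((pvScanTo pvIsOpen l).1 ++ r :: rs).length := by rw [← hl]
            simp only [List.length_append, List.length_cons] at hr2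
            omega
          have htail : pvGoA true (pvScanTo pvIsClose rs).2 = pvAltGo (pvScanTo pvIsClose rs).2 := by
            cases h2 : (pvScanTo pvIsClose rs).2 with
            | nil => rw [pvAltGo_eq]; simp [pvGoA, pvScanTo, pvMapP]
            | cons d ds =>
                have hdclose : pvIsClose d = true := by
                  have := hhead2 d; rw [h2] at this; exact this (by simp)
                have hdc : d = ']' ∨ d = ')' := by
                  simpa [pvIsClose] using hdclose
                have hdopen : pvIsOpen d = false := by
                  rcases hdc with h | h <;> simp [h, pvIsOpen]
                have hdp : ¬ d = 'p' := by rcases hdc with h | h <;> simp [h]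
                have hgd : pvGoA true (d :: ds) = d :: pvGoA false ds := by
                  rcases hdc with h | h <;> simp [pvGoA, h]
                have hds : ds.length ≤ n := by
                  rw [h2] at hlen; simp only [List.length_cons] at hlen; omega
                rw [hgd, pvAltGo_cons_notOpen d ds hdopen, if_neg hdp,
                    ih ds hds]
          rw [htail]
          simp [PySem.Chars.upper]

-- ===== VERDICT (by name: the statement is the Claim_ definition above) =====
theorem capital_within_bracket_spec : Claim_equal_capital_within_bracket := by
  intro mol _
  unfold Spec_capital_within_bracket capital_within_bracket capital_within_bracket_alt
  rw [pvFoldA_eq_goA, pvGoA_false_eq_altGo mol.toList.length mol.toList le_rfl]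
  simp
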